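-- pv_equiv track=rewrite | github.com/miliar/Code_Jam_Webscraper | Solutions_in_python/Problem_181/test1.py | process
-- ===== SOURCE A (Python) =====
-- def process(input):
-- 	#print 'input : ' + input
-- 	if len(input) <= 0:
-- 		return
--
-- 	strList = []
-- 	strList.append(input[0])
--
-- 	for i in range(1, len(input)):
-- 		c = input[i];
--
-- 		tmpList = []
-- 		for j in range(0, len(strList)):
--
-- 			after = strList[j] + c
-- 			tmpList.append(after)
--
-- 			before = c + strList[j]
-- 			tmpList.append(before)
--
-- 		strList = tmpList
--
-- 	strList.sort()
-- 	result = strList[len(strList) - 1]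
-- 	#print 'result : ' + result
-- 	return result
-- ===== SOURCE B (Python) =====
-- def process(input):
--     if len(input) <= 0:
--         return
--     w = input[0]
--     for c in input[1:]:
--         w = max(w + c, c + w)
--     return w
-- ===== Notes on version B (the rewrite author's own statement) =====
-- stated objective: faster
-- what changed: A enumerates all 2^(n-1) strings obtainable by inserting each character at the front or back, sorts them and takes the last; B keeps only the running maximum string and, for each character c, replaces it with max(w+c, c+w), which provably equals the maximum of the whole set.
-- outside the precondition, e.g. on process(''): A returns None, B returns None
import Mathlib
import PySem

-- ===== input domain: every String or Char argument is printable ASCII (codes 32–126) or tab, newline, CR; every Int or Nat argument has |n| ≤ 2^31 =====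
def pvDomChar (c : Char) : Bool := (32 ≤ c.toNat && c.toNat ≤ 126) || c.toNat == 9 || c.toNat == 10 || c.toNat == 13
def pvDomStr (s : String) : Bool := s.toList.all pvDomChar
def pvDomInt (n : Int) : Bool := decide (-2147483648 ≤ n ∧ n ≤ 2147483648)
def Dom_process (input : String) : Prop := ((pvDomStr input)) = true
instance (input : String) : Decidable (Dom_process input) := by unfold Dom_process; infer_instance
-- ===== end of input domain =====

-- B replaces A's exponential enumeration of all front/back insertion results (sorted, take last)
-- by a single pass keeping only the running maximum string: faster (asymptotic).


-- ===== PORT A =====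
-- one iteration of A's outer loop: tmpList collects s+c and c+s for every s in strList
-- (list.append is ported as cons onto the accumulator, reversed once at the end)
def aStep (c : Char) (L : List (List Char)) : List (List Char) :=
  (L.foldl (fun tmp s => (c :: s) :: (s ++ [c]) :: tmp) []).reverse

-- A's outer loop over input[1:], carrying strList
def aLoop (cs : List Char) (L : List (List Char)) : List (List Char) :=
  match cs with
  | [] => L
  | c :: rest => aLoop rest (aStep c L)

def process (input : String) : String :=
  match input.toList with
  | [] => ""   -- Python A returns None here (no String value); excluded by Pre_process
  | c0 :: rest =>
    let strList := aLoop rest [[c0]]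
    -- strList.sort(); result = strList[len(strList) - 1]
    -- (Python's stable sort by ≤ is ported as the library's stable List.mergeSort)
    String.ofList ((strList.mergeSort (fun a b => decide (a ≤ b))).getLastD [])

-- ===== PORT B =====
-- Python's max(a, b): returns b exactly when a < b
def bMax (a b : List Char) : List Char := if a < b then b else a

def process_alt (input : String) : String :=
  match input.toList with
  | [] => ""   -- Python B returns None here (no String value); excluded by Pre_process
  | c0 :: rest =>
    String.ofList (rest.foldl (fun w c => bMax (w ++ [c]) (c :: w)) [c0])

-- ===== PRECONDITION & SPEC =====
-- On the empty string both Pythons return None, which is not a String value; excluded.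
def Pre_process (input : String) : Prop := input.toList ≠ []
instance (input : String) : Decidable (Pre_process input) := by unfold Pre_process; infer_instance
def pvWitness_process : String := "ba"

def Spec_process (input : String) (out : String) : Prop := out = process_alt input
instance (input : String) (out : String) : Decidable (Spec_process input out) := by unfold Spec_process; infer_instance

-- ===== CLAIM (what is proved, stated in full; the proofs are below) =====
def Claim_equal_process : Prop := ∀ (input : String), Dom_process input → Pre_process input → Spec_process input (process input)

-- ===== LEMMAS AND PROOFS =====

-- the invariant: w is a member of strList, is an upper bound of it, and all members share w's length
def ListInv (L : List (List Char)) (w : List Char) : Prop :=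
  w ∈ L ∧ ∀ s ∈ L, s ≤ w ∧ s.length = w.length

theorem aStep_aux (c : Char) (L : List (List Char)) (acc : List (List Char)) :
    L.foldl (fun tmp s => (c :: s) :: (s ++ [c]) :: tmp) acc
      = (L.flatMap (fun s => [s ++ [c], c :: s])).reverse ++ acc := by
  induction L generalizing acc with
  | nil => simp
  | cons x rest ih => simp [List.foldl_cons, ih]

theorem aStep_eq_flatMap (c : Char) (L : List (List Char)) :
    aStep c L = L.flatMap (fun s => [s ++ [c], c :: s]) := by
  simp [aStep, aStep_aux]

theorem mem_aStep {c : Char} {L : List (List Char)} {t : List Char} :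
    t ∈ aStep c L ↔ ∃ s ∈ L, t = s ++ [c] ∨ t = c :: s := by
  simp only [aStep_eq_flatMap, List.mem_flatMap, List.mem_cons, List.not_mem_nil, or_false]

theorem bMax_eq_max (a b : List Char) : bMax a b = max a b := by
  unfold bMax
  rcases lt_trichotomy a b with h | h | h
  · simp [h, max_eq_right h.le]
  · simp [h]
  · simp [not_lt_of_gt h, max_eq_left h.le]

-- equal-length lists: strict order is preserved by appending on the right
theorem append_lt_append {s w : List Char} (t : List Char)
    (h : s < w) (hl : s.length = w.length) : s ++ t < w ++ t := by
  induction s generalizing w with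
  | nil =>
      cases w with
      | nil => exact absurd h (lt_irrefl _)
      | cons b w' => simp at hl
  | cons a s' ih =>
      cases w with
      | nil => simp at hl
      | cons b w' =>
          have h' : List.Lex (· < ·) (a :: s') (b :: w') := h
          cases h' with
          | cons h'' => exact List.Lex.cons (ih h'' (by simpa using hl))
          | rel hab => exact List.Lex.rel hab

theorem step_preserves {L : List (List Char)} {w : List Char} (c : Char)
    (hInv : ListInv L w) : ListInv (aStep c L) (bMax (w ++ [c]) (c :: w)) := by
  obtain ⟨hmem, hub⟩ := hInv
  rw [bMax_eq_max]
  constructor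
  · rcases max_choice (w ++ [c]) (c :: w) with h | h <;> rw [h] <;>
      exact mem_aStep.mpr ⟨w, hmem, by simp⟩
  · intro t ht
    obtain ⟨s, hs, hcase⟩ := mem_aStep.mp ht
    obtain ⟨hle, hlen⟩ := hub s hs
    have hlenmax : (max (w ++ [c]) (c :: w)).length = w.length + 1 := by
      rcases max_choice (w ++ [c]) (c :: w) with h | h <;> simp [h]
    rcases hcase with rfl | rfl
    · refine ⟨?_, by simp [hlen, hlenmax]⟩
      rcases eq_or_lt_of_le hle with rfl | hlt
      · exact le_max_left _ _
      · exact le_trans (le_of_lt (append_lt_append [c] hlt hlen)) (le_max_left _ _)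
    · refine ⟨?_, by simp [hlen, hlenmax]⟩
      exact le_trans (List.cons_le_cons c hle) (le_max_right _ _)

theorem loop_preserves (cs : List Char) (L : List (List Char)) (w : List Char)
    (hInv : ListInv L w) :
    ListInv (aLoop cs L) (cs.foldl (fun w c => bMax (w ++ [c]) (c :: w)) w) := by
  induction cs generalizing L w with
  | nil => exact hInv
  | cons c rest ih => exact ih _ _ (step_preserves c hInv)

-- the last element of sorted(L) is any member that bounds L from above
theorem sorted_getLastD_eq {L : List (List Char)} {w : List Char} (hInv : ListInv L w) :
    ((L.mergeSort (fun a b => decide (a ≤ b))).getLastD []) = w := by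
  obtain ⟨hmem, hub⟩ := hInv
  have hperm : (L.mergeSort (fun a b => decide (a ≤ b))).Perm L := List.mergeSort_perm L _
  have hne : L.mergeSort (fun a b => decide (a ≤ b)) ≠ [] := by
    intro h
    rw [h] at hperm
    exact (List.not_mem_nil (a := w)) (hperm.symm.mem_iff.mp hmem)
  have hpw : (L.mergeSort (fun a b => decide (a ≤ b))).Pairwise
      (fun a b => decide (a ≤ b) = true) :=
    List.pairwise_mergeSort
      (by intro a b c h1 h2; simp only [decide_eq_true_eq] at *; exact le_trans h1 h2)
      (by intro a b; simpa using le_total a b) L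
  obtain ⟨i, hi, hwi⟩ := List.getElem_of_mem (hperm.mem_iff.mpr hmem)
  -- w ≤ last : w sits at some index and mergeSort's output is pairwise ≤
  have h2 : w ≤ (L.mergeSort (fun a b => decide (a ≤ b))).getLast hne := by
    rw [List.getLast_eq_getElem hne, ← hwi]
    rcases Nat.lt_or_ge i ((L.mergeSort (fun a b => decide (a ≤ b))).length - 1) with hlt | hge
    · have := List.pairwise_iff_getElem.mp hpw i
        ((L.mergeSort (fun a b => decide (a ≤ b))).length - 1) hi (by omega) hlt
      simpa using this
    · have : i = (L.mergeSort (fun a b => decide (a ≤ b))).length - 1 := by omega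
      simp [this]
  -- last ≤ w : the last element is a member of L, and w bounds L
  have h1 : (L.mergeSort (fun a b => decide (a ≤ b))).getLast hne ≤ w :=
    (hub _ (hperm.mem_iff.mp (List.getLast_mem hne))).1
  rw [List.getLastD_eq_getLast?, List.getLast?_eq_some_getLast hne]
  exact le_antisymm h1 h2

-- ===== VERDICT (by name: the statement is the Claim_ definition above) =====
theorem process_spec : Claim_equal_process := by
  intro input _ hpre
  unfold Spec_process process process_alt
  cases h : input.toList with
  | nil => exact absurd h hpre
  | cons c0 rest =>
      have hInv0 : ListInv [[c0]] [c0] := ⟨by simp, by simp⟩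
      have := sorted_getLastD_eq (loop_preserves rest [[c0]] [c0] hInv0)
      simp only [this]
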